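-- pv_equiv track=rewrite | github.com/leksval/canrun | canrun_ml_predictor.py | _get_gpu_generation
-- ===== SOURCE A (Python) =====
-- def _get_gpu_generation(gpu_model: str) -> str:
--     """Classify GPU generation for quality settings."""
--     gpu_lower = gpu_model.lower()
--
--     if 'rtx 50' in gpu_lower or any(model in gpu_lower for model in ['5090', '5080', '5070']):
--         return "RTX_50"
--     elif 'rtx 40' in gpu_lower or any(model in gpu_lower for model in ['4090', '4080', '4070']):
--         return "RTX_40"
--     elif 'rtx 30' in gpu_lower:
--         return "RTX_30"
--     elif 'rtx 20' in gpu_lower: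
--         return "RTX_20"
--     elif 'gtx 16' in gpu_lower:
--         return "GTX_16"
--     elif 'gtx 10' in gpu_lower:
--         return "GTX_10"
--     else:
--         return "OLD"
-- ===== SOURCE B (Python) =====
-- _PATTERNS = [
--     ("rtx 50", 0), ("5090", 0), ("5080", 0), ("5070", 0),
--     ("rtx 40", 1), ("4090", 1), ("4080", 1), ("4070", 1),
--     ("rtx 30", 2), ("rtx 20", 3), ("gtx 16", 4), ("gtx 10", 5),
-- ]
-- _LABELS = ["RTX_50", "RTX_40", "RTX_30", "RTX_20", "GTX_16", "GTX_10", "OLD"]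
--
--
-- def _get_gpu_generation(gpu_model: str) -> str:
--     """Classify GPU generation for quality settings."""
--     s = gpu_model.lower()
--     best = 6  # rank of "OLD"
--     for i in range(len(s)):
--         for pat, rank in _PATTERNS:
--             if rank < best and s.startswith(pat, i):
--                 best = rank
--     return _LABELS[best]
-- ===== Notes on version B (the rewrite author's own statement) =====
-- stated objective: alternative
-- what changed: Replaces A's chain of 10 independent substring searches by a single left-to-right scan of the lowercased string that at each position tries every (pattern, rank) pair and keeps the minimum rank seen, then indexes a label table with that rank.
import Mathlib
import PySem

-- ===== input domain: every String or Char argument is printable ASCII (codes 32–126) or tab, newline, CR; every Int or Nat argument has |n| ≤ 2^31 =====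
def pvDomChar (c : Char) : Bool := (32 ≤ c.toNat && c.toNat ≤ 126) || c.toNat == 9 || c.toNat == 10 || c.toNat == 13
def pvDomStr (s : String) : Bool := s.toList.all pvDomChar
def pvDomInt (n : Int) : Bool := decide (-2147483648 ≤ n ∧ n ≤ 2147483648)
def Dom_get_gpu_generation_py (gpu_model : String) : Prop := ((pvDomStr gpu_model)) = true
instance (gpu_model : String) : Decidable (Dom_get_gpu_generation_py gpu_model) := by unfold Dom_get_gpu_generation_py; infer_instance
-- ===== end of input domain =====

-- B replaces A's chain of 10 independent substring searches by a single left-to-right scan of the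
-- lowercased string that, at each position, lowers a best-rank accumulator when a pattern starts
-- there, then indexes a label table (alternative algorithm; same result).

-- ===== PORT A =====
def get_gpu_generation_py (gpu_model : String) : String :=
  let gpu_lower := PySem.Str.lower gpu_model
  if PySem.Str.isIn "rtx 50" gpu_lower
      || (["5090", "5080", "5070"].any (fun model => PySem.Str.isIn model gpu_lower)) then
    "RTX_50"
  else if PySem.Str.isIn "rtx 40" gpu_lower
      || (["4090", "4080", "4070"].any (fun model => PySem.Str.isIn model gpu_lower)) then
    "RTX_40"
  else if PySem.Str.isIn "rtx 30" gpu_lower then "RTX_30"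
  else if PySem.Str.isIn "rtx 20" gpu_lower then "RTX_20"
  else if PySem.Str.isIn "gtx 16" gpu_lower then "GTX_16"
  else if PySem.Str.isIn "gtx 10" gpu_lower then "GTX_10"
  else "OLD"

-- ===== PORT B =====
def genPatterns : List (List Char × Nat) :=
  [ ("rtx 50".toList, 0), ("5090".toList, 0), ("5080".toList, 0), ("5070".toList, 0),
    ("rtx 40".toList, 1), ("4090".toList, 1), ("4080".toList, 1), ("4070".toList, 1),
    ("rtx 30".toList, 2), ("rtx 20".toList, 3), ("gtx 16".toList, 4), ("gtx 10".toList, 5) ]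

def genLabels : List String :=
  ["RTX_50", "RTX_40", "RTX_30", "RTX_20", "GTX_16", "GTX_10", "OLD"]

-- inner loop of Source B: try every pattern at the current position (the suffix s)
def genStep (s : List Char) (best : Nat) : Nat :=
  genPatterns.foldl (fun b pr => if pr.2 < b ∧ pr.1.isPrefixOf s then pr.2 else b) best

-- outer loop of Source B: positions i = 0, 1, … as successive suffixes
def genBest : List Char → Nat → Nat
  | [], best => best
  | c :: rest, best => genBest rest (genStep (c :: rest) best)

def get_gpu_generation_py_alt (gpu_model : String) : String :=
  let s := (PySem.Str.lower gpu_model).toList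
  genLabels.getD (genBest s 6) "OLD"

-- ===== PRECONDITION & SPEC =====
def Spec_get_gpu_generation_py (gpu_model : String) (out : String) : Prop := out = get_gpu_generation_py_alt gpu_model
instance (gpu_model : String) (out : String) : Decidable (Spec_get_gpu_generation_py gpu_model out) := by unfold Spec_get_gpu_generation_py; infer_instance

-- ===== CLAIM =====
def Claim_equal_get_gpu_generation_py : Prop := ∀ (gpu_model : String), Dom_get_gpu_generation_py gpu_model → Spec_get_gpu_generation_py gpu_model (get_gpu_generation_py gpu_model)

-- ===== LEMMAS AND PROOFS =====

-- proof-side characterisation: the same rank fold, but testing each pattern anywhere in s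
def genRank (s : List Char) : Nat :=
  genPatterns.foldl (fun b pr => if pr.2 < b ∧ PySem.Chars.isIn pr.1 s then pr.2 else b) 6

theorem genStep_le (s : List Char) (b : Nat) : genStep s b ≤ b := by
  unfold genStep
  induction genPatterns generalizing b with
  | nil => exact le_rfl
  | cons x L ih =>
    simp only [List.foldl_cons]
    refine le_trans (ih _) ?_
    split_ifs with h
    · omega
    · exact le_rfl

-- the rank fold with an OR-condition splits into the min of two rank folds
theorem fold_or_min (u t : List Char) (L : List (List Char × Nat)) (b1 b2 : Nat) :
    L.foldl (fun b pr => if pr.2 < b ∧ (pr.1.isPrefixOf u || PySem.Chars.isIn pr.1 t) then pr.2 else b) (min b1 b2)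
      = min (L.foldl (fun b pr => if pr.2 < b ∧ pr.1.isPrefixOf u then pr.2 else b) b1)
            (L.foldl (fun b pr => if pr.2 < b ∧ PySem.Chars.isIn pr.1 t then pr.2 else b) b2) := by
  induction L generalizing b1 b2 with
  | nil => rfl
  | cons x L ih =>
    simp only [List.foldl_cons]
    rw [show (if x.2 < min b1 b2 ∧ (x.1.isPrefixOf u || PySem.Chars.isIn x.1 t) then x.2 else min b1 b2)
          = min (if x.2 < b1 ∧ x.1.isPrefixOf u then x.2 else b1)
                (if x.2 < b2 ∧ PySem.Chars.isIn x.1 t then x.2 else b2) by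
        cases hP : x.1.isPrefixOf u <;> cases hQ : PySem.Chars.isIn x.1 t <;> simp <;> split_ifs <;> omega]
    exact ih _ _

theorem fold_min_init (u : List Char) (L : List (List Char × Nat)) (b1 b2 : Nat) :
    L.foldl (fun b pr => if pr.2 < b ∧ pr.1.isPrefixOf u then pr.2 else b) (min b1 b2)
      = min b1 (L.foldl (fun b pr => if pr.2 < b ∧ pr.1.isPrefixOf u then pr.2 else b) b2) := by
  induction L generalizing b1 b2 with
  | nil => rfl
  | cons x L ih =>
    simp only [List.foldl_cons]
    rw [show (if x.2 < min b1 b2 ∧ x.1.isPrefixOf u then x.2 else min b1 b2)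
          = min b1 (if x.2 < b2 ∧ x.1.isPrefixOf u then x.2 else b2) by
        cases hP : x.1.isPrefixOf u <;> simp <;> split_ifs <;> omega]
    exact ih _ _

theorem isIn_cons (p : List Char) (c : Char) (t : List Char) :
    PySem.Chars.isIn p (c :: t) = (p.isPrefixOf (c :: t) || PySem.Chars.isIn p t) := by
  rw [Bool.eq_iff_iff]
  simp only [Bool.or_eq_true, PySem.Chars.isIn_iff_infix, List.isPrefixOf_iff_prefix,
    List.infix_cons_iff]

theorem genRank_cons (c : Char) (t : List Char) :
    genRank (c :: t) = min (genStep (c :: t) 6) (genRank t) := by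
  unfold genRank genStep
  have h : ∀ pr : List Char × Nat,
      PySem.Chars.isIn pr.1 (c :: t) = (pr.1.isPrefixOf (c :: t) || PySem.Chars.isIn pr.1 t) :=
    fun pr => isIn_cons pr.1 c t
  calc genPatterns.foldl (fun b pr => if pr.2 < b ∧ PySem.Chars.isIn pr.1 (c :: t) then pr.2 else b) 6
      = genPatterns.foldl
          (fun b pr => if pr.2 < b ∧ (pr.1.isPrefixOf (c :: t) || PySem.Chars.isIn pr.1 t) then pr.2 else b)
          (min 6 6) := by
        simp only [h, Nat.min_self]
    _ = _ := fold_or_min (c :: t) t genPatterns 6 6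

theorem genRank_le (s : List Char) : genRank s ≤ 6 := by
  unfold genRank
  have : ∀ (L : List (List Char × Nat)) (b : Nat),
      L.foldl (fun b pr => if pr.2 < b ∧ PySem.Chars.isIn pr.1 s then pr.2 else b) b ≤ b := by
    intro L b
    induction L generalizing b with
    | nil => exact le_rfl
    | cons y M ihm =>
      simp only [List.foldl_cons]
      refine le_trans (ihm _) ?_
      split_ifs with h
      · omega
      · exact le_rfl
  exact this _ 6

theorem genBest_eq (s : List Char) (b : Nat) (hb : b ≤ 6) :
    genBest s b = min b (genRank s) := by
  induction s generalizing b with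
  | nil =>
    have h6 : genRank [] = 6 := by decide
    simp only [genBest, h6]
    omega
  | cons c t ih =>
    have hstep : genStep (c :: t) b ≤ 6 := le_trans (genStep_le _ _) hb
    rw [genBest, ih _ hstep, genRank_cons]
    have hb' : genStep (c :: t) b = min b (genStep (c :: t) 6) := by
      unfold genStep
      have hm : b = min b 6 := by omega
      rw [hm, fold_min_init]
      omega
    rw [hb']
    omega

theorem fold_group1 (l p : List Char) (r b : Nat) :
    List.foldl (fun b pr => if pr.2 < b ∧ PySem.Chars.isIn pr.1 l then pr.2 else b) b [(p, r)]
      = if r < b ∧ PySem.Chars.isIn p l then r else b := by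
  simp only [List.foldl_cons, List.foldl_nil]

theorem fold_group4 (l p1 p2 p3 p4 : List Char) (r b : Nat) :
    List.foldl (fun b pr => if pr.2 < b ∧ PySem.Chars.isIn pr.1 l then pr.2 else b) b
        [(p1, r), (p2, r), (p3, r), (p4, r)]
      = if r < b ∧ (PySem.Chars.isIn p1 l || PySem.Chars.isIn p2 l || PySem.Chars.isIn p3 l
            || PySem.Chars.isIn p4 l) then r else b := by
  simp only [List.foldl_cons, List.foldl_nil]
  cases h1 : PySem.Chars.isIn p1 l <;> cases h2 : PySem.Chars.isIn p2 l <;>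
    cases h3 : PySem.Chars.isIn p3 l <;> cases h4 : PySem.Chars.isIn p4 l <;>
    simp only [Bool.or_false, Bool.or_true, and_true] <;>
    split_ifs <;> omega

theorem table_eq (l : List Char) :
    genLabels.getD (genRank l) "OLD" =
      (if PySem.Chars.isIn "rtx 50".toList l || PySem.Chars.isIn "5090".toList l
          || PySem.Chars.isIn "5080".toList l || PySem.Chars.isIn "5070".toList l then "RTX_50"
      else if PySem.Chars.isIn "rtx 40".toList l || PySem.Chars.isIn "4090".toList l
          || PySem.Chars.isIn "4080".toList l || PySem.Chars.isIn "4070".toList l then "RTX_40"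
      else if PySem.Chars.isIn "rtx 30".toList l then "RTX_30"
      else if PySem.Chars.isIn "rtx 20".toList l then "RTX_20"
      else if PySem.Chars.isIn "gtx 16".toList l then "GTX_16"
      else if PySem.Chars.isIn "gtx 10".toList l then "GTX_10"
      else "OLD") := by
  have hsplit : genPatterns =
      [("rtx 50".toList, 0), ("5090".toList, 0), ("5080".toList, 0), ("5070".toList, 0)]
      ++ [("rtx 40".toList, 1), ("4090".toList, 1), ("4080".toList, 1), ("4070".toList, 1)]
      ++ [("rtx 30".toList, 2)] ++ [("rtx 20".toList, 3)] ++ [("gtx 16".toList, 4)]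
      ++ [("gtx 10".toList, 5)] := rfl
  unfold genRank
  rw [hsplit]
  simp only [List.foldl_append, fold_group4, fold_group1]
  generalize (PySem.Chars.isIn "rtx 50".toList l || PySem.Chars.isIn "5090".toList l
      || PySem.Chars.isIn "5080".toList l || PySem.Chars.isIn "5070".toList l) = A
  generalize (PySem.Chars.isIn "rtx 40".toList l || PySem.Chars.isIn "4090".toList l
      || PySem.Chars.isIn "4080".toList l || PySem.Chars.isIn "4070".toList l) = B
  generalize PySem.Chars.isIn "rtx 30".toList l = C
  generalize PySem.Chars.isIn "rtx 20".toList l = D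
  generalize PySem.Chars.isIn "gtx 16".toList l = E
  generalize PySem.Chars.isIn "gtx 10".toList l = F
  revert A B C D E F
  decide

-- ===== VERDICT =====
theorem get_gpu_generation_py_spec : Claim_equal_get_gpu_generation_py := by
  intro gpu_model _
  unfold Spec_get_gpu_generation_py get_gpu_generation_py get_gpu_generation_py_alt
  show _ = genLabels.getD (genBest (PySem.Str.lower gpu_model).toList 6) "OLD"
  rw [genBest_eq _ 6 le_rfl]
  have h : min 6 (genRank (PySem.Str.lower gpu_model).toList)
      = genRank (PySem.Str.lower gpu_model).toList := by
    have := genRank_le (PySem.Str.lower gpu_model).toList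
    omega
  rw [h, table_eq]
  simp only [PySem.Str.isIn_eq, List.any_cons, List.any_nil, Bool.or_false, Bool.or_assoc]
  rfl
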